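-- pv_equiv track=rewrite | github.com/SethuSrivatsa8/Leetcode | degree-of-an-array/degree-of-an-array.py | findShortestSubArray
-- ===== SOURCE A (Python) =====
-- from typing import List
--
-- from collections import defaultdict
--
-- def findShortestSubArray(nums: List[int]) -> int:
--     # Create a defaultdict with Deg objects to store the start index,
--     # end index, and count of each number in the array
--     d = defaultdict(Deg)
--
--     # Iterate over the array and update the start index, end index,
--     # and count for each number
--     for i, num in enumerate(nums):
--         if num not in d:
--             # If the number is encountered for the first time, update
--             # its start index
--             d[num].start = i
--         # Update the end index and count for each occurrence of the number
--         d[num].end = i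
--         d[num].count += 1
--
--     # Find the maximum count (degree) among all numbers in the array
--     max_count = max(d.values(), key=lambda x: x.count).count
--
--     # Find the Deg objects with the maximum count
--     degs_with_max_count = [x for x in d.values() if x.count == max_count]
--
--     # Find the shortest subarray by calculating the length of each subarray
--     # with the maximum count and taking the minimum length
--     shortest_length = min(degs_with_max_count, key=lambda x: x.end - x.start)
--
--     # Return the length of the shortest subarray
--     return shortest_length.end - shortest_length.start + 1
--
-- class Deg:
--     def __init__(self):
--         self.start = None
--         self.end = None
--         self.count = 0
-- ===== SOURCE B (Python) =====
-- def findShortestSubArray(nums):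
--     first = {}
--     count = {}
--     degree = 0
--     ans = 0
--     for i, num in enumerate(nums):
--         if num not in first:
--             first[num] = i
--         count[num] = count.get(num, 0) + 1
--         c = count[num]
--         span = i - first[num] + 1
--         if c > degree:
--             degree = c
--             ans = span
--         elif c == degree:
--             ans = min(ans, span)
--     return ans
-- ===== Notes on version B (the rewrite author's own statement) =====
-- stated objective: simpler
-- what changed: Replaces the Deg-class dict plus three post-passes (max by count, filter by count, min by span) with a single running-best pass tracking first-seen index, count, current degree and best span; Pre_ excludes the empty list, on which A's max() raises ValueError.
import Mathlib
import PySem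

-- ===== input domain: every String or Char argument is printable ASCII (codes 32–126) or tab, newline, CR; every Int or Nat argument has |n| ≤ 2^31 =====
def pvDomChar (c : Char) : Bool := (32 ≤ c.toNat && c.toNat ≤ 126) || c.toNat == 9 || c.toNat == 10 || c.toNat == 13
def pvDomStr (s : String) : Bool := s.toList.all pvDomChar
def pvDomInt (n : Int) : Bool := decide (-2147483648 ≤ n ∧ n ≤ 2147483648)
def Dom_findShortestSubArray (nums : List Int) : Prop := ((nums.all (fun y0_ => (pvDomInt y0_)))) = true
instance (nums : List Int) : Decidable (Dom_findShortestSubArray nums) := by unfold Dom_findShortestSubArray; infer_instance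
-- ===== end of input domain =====

-- B replaces A's Deg-class dict plus three post-passes (max by count, filter, min by span)
-- with a single pass tracking first-seen index, count, running degree and best span (objective: simpler).


-- ===== PORT A =====
-- one iteration of A's loop; dict value = (start, end, count) of the Deg object.
-- In the fresh-Deg branch end/count start as (0-stands-for-None, 0): 'end' is overwritten before it is ever read,
-- exactly as Python's Deg() default is; the modify default (0,0,0) is never used (the key is present).
def pvStepA (d : PySem.Dict Int (Int × Int × Int)) (p : Int × Int) : PySem.Dict Int (Int × Int × Int) :=
  let d1 := if d.contains p.2 then d else d.insert p.2 (p.1, 0, 0)   -- if num not in d: d[num].start = i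
  d1.modify p.2 (0, 0, 0) (fun t => (t.1, p.1, t.2.2 + 1))           -- d[num].end = i; d[num].count += 1

def findShortestSubArray (nums : List Int) : Int :=
  let d := (PySem.List.enumerate nums).foldl pvStepA (PySem.Dict.mk [])
  match PySem.List.max? d.values (fun x => x.2.2) with
  | none => 0   -- Python's max() raises ValueError here (empty nums); excluded by Pre_
  | some m =>
    let degs := d.values.filter (fun x => x.2.2 == m.2.2)
    match PySem.List.min? degs (fun x => x.2.1 - x.1) with
    | none => 0   -- unreachable: m itself is in degs
    | some s => s.2.1 - s.1 + 1

-- ===== PORT B =====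
-- one iteration of B's loop; state = (first, count, degree, ans)
def pvStepB (s : PySem.Dict Int Int × PySem.Dict Int Int × Int × Int) (p : Int × Int) :
    PySem.Dict Int Int × PySem.Dict Int Int × Int × Int :=
  let first := if s.1.contains p.2 then s.1 else s.1.insert p.2 p.1   -- if num not in first: first[num] = i
  let count := s.2.1.insert p.2 (s.2.1.getD p.2 0 + 1)                -- count[num] = count.get(num, 0) + 1
  let c := count.getD p.2 0                                           -- c = count[num]  (key just inserted)
  let span := p.1 - first.getD p.2 0 + 1                              -- span = i - first[num] + 1 (key present)
  if s.2.2.1 < c then (first, count, c, span)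
  else if c == s.2.2.1 then (first, count, s.2.2.1, min s.2.2.2 span)
  else (first, count, s.2.2.1, s.2.2.2)

def findShortestSubArray_alt (nums : List Int) : Int :=
  ((PySem.List.enumerate nums).foldl pvStepB (PySem.Dict.mk [], PySem.Dict.mk [], 0, 0)).2.2.2

-- ===== PRECONDITION & SPEC =====
-- Pre_ excludes only the empty list, on which A's max() raises ValueError.
def Pre_findShortestSubArray (nums : List Int) : Prop := nums ≠ []
instance (nums : List Int) : Decidable (Pre_findShortestSubArray nums) := by unfold Pre_findShortestSubArray; infer_instance
def pvWitness_findShortestSubArray : List Int := [1, 2, 2]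

def Spec_findShortestSubArray (nums : List Int) (out : Int) : Prop := out = findShortestSubArray_alt nums
instance (nums : List Int) (out : Int) : Decidable (Spec_findShortestSubArray nums out) := by unfold Spec_findShortestSubArray; infer_instance

-- ===== CLAIM (what is proved, stated in full; the proofs are below) =====
def Claim_equal_findShortestSubArray : Prop := ∀ (nums : List Int), Dom_findShortestSubArray nums → Pre_findShortestSubArray nums → Spec_findShortestSubArray nums (findShortestSubArray nums)

-- ===== LEMMAS AND PROOFS =====

-- count and span of a dict value (start, end, count)
def pvCnt (e : Int × Int × Int) : Int := e.2.2
def pvSpn (e : Int × Int × Int) : Int := e.2.1 - e.1 + 1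

-- maximum count over a list of dict values (0 on [])
def pvMaxC : List (Int × Int × Int) → Int
  | [] => 0
  | e :: es => max (pvCnt e) (pvMaxC es)

-- minimum span among the values of count g (none if no such value)
def pvMinAt (g : Int) : List (Int × Int × Int) → Option Int
  | [] => none
  | e :: es =>
    if pvCnt e = g then
      some (match pvMinAt g es with | none => pvSpn e | some a => min (pvSpn e) a)
    else pvMinAt g es

def pvOMin : Option Int → Option Int → Option Int
  | none, b => b
  | some a, none => some a
  | some a, some b => some (min a b)

-- the update A applies to an existing entry (key num: start st kept, end := i, count := c0+1)
def pvUpd (num st i c0 : Int) (q : Int × (Int × Int × Int)) : Int × (Int × Int × Int) :=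
  if q.1 == num then (num, (st, i, c0 + 1)) else q

-- invariant tying B's running state to A's dict (items list L)
def pvInv (L : List (Int × (Int × Int × Int))) (first count : List (Int × Int)) (degree ans : Int) : Prop :=
  (L.map Prod.fst).Nodup ∧
  (∀ q ∈ L, 1 ≤ pvCnt q.2) ∧
  first = L.map (fun q => (q.1, q.2.1)) ∧
  count = L.map (fun q => (q.1, q.2.2.2)) ∧
  degree = pvMaxC (L.map Prod.snd) ∧
  ans = (pvMinAt (pvMaxC (L.map Prod.snd)) (L.map Prod.snd)).getD 0

lemma pvMaxC_nonneg (V : List (Int × Int × Int)) : 0 ≤ pvMaxC V := by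
  induction V with
  | nil => simp [pvMaxC]
  | cons e es ih => simp [pvMaxC]; omega

lemma pvCnt_le_maxC {V : List (Int × Int × Int)} {q} (h : q ∈ V) : pvCnt q ≤ pvMaxC V := by
  induction V with
  | nil => cases h
  | cons e es ih =>
    rcases List.mem_cons.mp h with h | h
    · subst h; simp [pvMaxC]
    · have := ih h; simp [pvMaxC]; right; omega

lemma pvMaxC_attained (V : List (Int × Int × Int)) :
    (∀ q ∈ V, 1 ≤ pvCnt q) → V ≠ [] → ∃ q ∈ V, pvCnt q = pvMaxC V := by
  induction V with
  | nil => intro _ h; exact absurd rfl h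
  | cons e es ih =>
    intro h1 _
    by_cases hes : es = []
    · subst hes
      refine ⟨e, by simp, ?_⟩
      have := h1 e (by simp)
      simp only [pvMaxC]
      omega
    · rcases ih (fun q hq => h1 q (by simp [hq])) hes with ⟨q, hq, hqc⟩
      by_cases hle : pvMaxC es ≤ pvCnt e
      · exact ⟨e, by simp, by simp [pvMaxC, max_eq_left hle]⟩
      · exact ⟨q, by simp [hq], by
          simp [pvMaxC, max_eq_right (le_of_lt (not_le.mp hle)), hqc]⟩

lemma pvMinAt_isSome {V : List (Int × Int × Int)} {g q} (hq : q ∈ V) (hg : pvCnt q = g) :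
    ∃ a, pvMinAt g V = some a := by
  induction V with
  | nil => cases hq
  | cons e es ih =>
    rcases List.mem_cons.mp hq with h | h
    · subst h; exact ⟨_, by rw [pvMinAt, if_pos hg]⟩
    · rcases ih h with ⟨a, ha⟩
      by_cases he : pvCnt e = g
      · exact ⟨_, by rw [pvMinAt, if_pos he]⟩
      · exact ⟨a, by simp [pvMinAt, he, ha]⟩

lemma pvMinAt_le {V : List (Int × Int × Int)} {g q a} (hq : q ∈ V) (hg : pvCnt q = g)
    (ha : pvMinAt g V = some a) : a ≤ pvSpn q := by
  induction V generalizing a with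
  | nil => cases hq
  | cons e es ih =>
    rcases List.mem_cons.mp hq with h | h
    · subst h
      simp [pvMinAt, hg] at ha
      rcases hmin : pvMinAt g es with _ | b <;> simp [hmin] at ha <;> omega
    · by_cases he : pvCnt e = g
      · simp [pvMinAt, he] at ha
        rcases hmin : pvMinAt g es with _ | b
        · rcases pvMinAt_isSome h hg with ⟨c, hc⟩; rw [hmin] at hc; cases hc
        · have := ih h hmin; simp [hmin] at ha; omega
      · simp [pvMinAt, he] at ha; exact ih h ha

lemma pvMinAt_attained {V : List (Int × Int × Int)} {g a} (ha : pvMinAt g V = some a) :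
    ∃ q ∈ V, pvCnt q = g ∧ pvSpn q = a := by
  induction V generalizing a with
  | nil => simp [pvMinAt] at ha
  | cons e es ih =>
    by_cases he : pvCnt e = g
    · simp [pvMinAt, he] at ha
      rcases hmin : pvMinAt g es with _ | b
      · simp [hmin] at ha; exact ⟨e, by simp, he, ha⟩
      · simp [hmin] at ha
        rcases le_total (pvSpn e) b with hle | hle
        · exact ⟨e, by simp, he, by omega⟩
        · rcases ih hmin with ⟨q, hq, hqg, hqs⟩
          exact ⟨q, by simp [hq], hqg, by omega⟩
    · simp [pvMinAt, he] at ha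
      rcases ih ha with ⟨q, hq, hqg, hqs⟩
      exact ⟨q, by simp [hq], hqg, hqs⟩

lemma pvMinAt_none {V : List (Int × Int × Int)} {g} (h : ∀ q ∈ V, pvCnt q ≠ g) :
    pvMinAt g V = none := by
  induction V with
  | nil => rfl
  | cons e es ih =>
    have he := h e (by simp)
    simp [pvMinAt, he]; exact ih (fun q hq => h q (by simp [hq]))

lemma pvMinAt_append (g : Int) (A B : List (Int × Int × Int)) :
    pvMinAt g (A ++ B) = pvOMin (pvMinAt g A) (pvMinAt g B) := by
  induction A with
  | nil => cases h : pvMinAt g B <;> simp [pvMinAt, pvOMin, h]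
  | cons e es ih =>
    by_cases he : pvCnt e = g
    · simp only [List.cons_append, pvMinAt, he, if_pos]
      rw [ih]
      rcases h1 : pvMinAt g es with _ | a <;> rcases h2 : pvMinAt g B with _ | b <;>
        simp [pvOMin, h1, h2, min_assoc]
    · simp [pvMinAt, he, ih]

lemma pvMaxC_append (A B : List (Int × Int × Int)) :
    pvMaxC (A ++ B) = max (pvMaxC A) (pvMaxC B) := by
  induction A with
  | nil => simp [pvMaxC, le_max_iff, pvMaxC_nonneg]
  | cons e es ih => simp [pvMaxC, ih, max_assoc]

-- keys are unique in a nodup-keyed items list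
lemma pvKeyUnique {L : List (Int × (Int × Int × Int))} {q r}
    (hnd : (L.map Prod.fst).Nodup) (hq : q ∈ L) (hr : r ∈ L) (h : q.1 = r.1) : q = r := by
  induction L with
  | nil => cases hq
  | cons e es ih =>
    simp only [List.map_cons, List.nodup_cons] at hnd
    rcases List.mem_cons.mp hq with hq | hq <;> rcases List.mem_cons.mp hr with hr | hr
    · rw [hq, hr]
    · exfalso
      have hmem : r.1 ∈ es.map Prod.fst := List.mem_map_of_mem hr
      rw [hq] at h
      exact hnd.1 (h.symm ▸ hmem)
    · exfalso
      have hmem : q.1 ∈ es.map Prod.fst := List.mem_map_of_mem hq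
      rw [hr] at h
      exact hnd.1 (h ▸ hmem)
    · exact ih hnd.2 hq hr

lemma pvMap_upd_id {L : List (Int × (Int × Int × Int))} {num st i c0}
    (h : ∀ q ∈ L, q.1 ≠ num) : L.map (pvUpd num st i c0) = L := by
  have h2 : L.map (pvUpd num st i c0) = L.map id :=
    List.map_congr_left (fun q hq => by simp [pvUpd, h q hq])
  simpa using h2

lemma pvUpd_maxC {L : List (Int × (Int × Int × Int))} {num st en c0 i}
    (hnd : (L.map Prod.fst).Nodup) (hm : (num, (st, en, c0)) ∈ L) :
    pvMaxC ((L.map (pvUpd num st i c0)).map Prod.snd) =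
      max (pvMaxC (L.map Prod.snd)) (c0 + 1) := by
  induction L with
  | nil => cases hm
  | cons e es ih =>
    simp only [List.map_cons, List.nodup_cons] at hnd
    by_cases he : e.1 = num
    · have heq : e = (num, (st, en, c0)) := by
        rcases List.mem_cons.mp hm with hm | hm
        · exact hm.symm
        · exfalso
          have : (num : Int) ∈ es.map Prod.fst := List.mem_map_of_mem hm
          rw [← he] at this
          exact hnd.1 this
      have hid : es.map (pvUpd num st i c0) = es := by
        apply pvMap_upd_id; intro q hq hk
        have : q.1 ∈ es.map Prod.fst := List.mem_map_of_mem hq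
        rw [hk, ← he] at this
        exact hnd.1 this
      simp only [List.map_cons, hid, heq, pvUpd, beq_self_eq_true, if_pos, pvMaxC, pvCnt]
      rcases le_total (pvMaxC (es.map Prod.snd)) c0 with h | h <;>
        simp [max_def] <;> split_ifs <;> omega
    · have hm' : (num, (st, en, c0)) ∈ es := by
        rcases List.mem_cons.mp hm with hm | hm
        · exact absurd (congrArg Prod.fst hm.symm) he
        · exact hm
      have : pvUpd num st i c0 e = e := by simp [pvUpd, he]
      simp only [List.map_cons, this, pvMaxC, ih hnd.2 hm']
      rcases le_total (pvMaxC (es.map Prod.snd)) (pvCnt e.2) with h | h <;>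
        simp [max_def] <;> split_ifs <;> omega

lemma pvUpd_minAt_ne {L : List (Int × (Int × Int × Int))} {num st en c0 i g}
    (hnd : (L.map Prod.fst).Nodup) (hm : (num, (st, en, c0)) ∈ L)
    (h0 : c0 ≠ g) (h1 : c0 + 1 ≠ g) :
    pvMinAt g ((L.map (pvUpd num st i c0)).map Prod.snd) =
      pvMinAt g (L.map Prod.snd) := by
  induction L with
  | nil => cases hm
  | cons e es ih =>
    simp only [List.map_cons, List.nodup_cons] at hnd
    by_cases he : e.1 = num
    · have heq : e = (num, (st, en, c0)) := by
        rcases List.mem_cons.mp hm with hm | hm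
        · exact hm.symm
        · exfalso
          have : (num : Int) ∈ es.map Prod.fst := List.mem_map_of_mem hm
          rw [← he] at this
          exact hnd.1 this
      have hid : es.map (pvUpd num st i c0) = es := by
        apply pvMap_upd_id; intro q hq hk
        have : q.1 ∈ es.map Prod.fst := List.mem_map_of_mem hq
        rw [hk, ← he] at this
        exact hnd.1 this
      simp [heq, pvUpd, hid, pvMinAt, pvCnt, h0, h1]
    · have hm' : (num, (st, en, c0)) ∈ es := by
        rcases List.mem_cons.mp hm with hm | hm
        · exact absurd (congrArg Prod.fst hm.symm) he
        · exact hm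
      have hu : pvUpd num st i c0 e = e := by simp [pvUpd, he]
      simp only [List.map_cons, hu, pvMinAt, ih hnd.2 hm']

lemma pvUpd_minAt_join {L : List (Int × (Int × Int × Int))} {num st en c0 i g}
    (hnd : (L.map Prod.fst).Nodup) (hm : (num, (st, en, c0)) ∈ L)
    (h0 : c0 ≠ g) (h1 : c0 + 1 = g) :
    pvMinAt g ((L.map (pvUpd num st i c0)).map Prod.snd) =
      pvOMin (pvMinAt g (L.map Prod.snd)) (some (i - st + 1)) := by
  induction L with
  | nil => cases hm
  | cons e es ih =>
    simp only [List.map_cons, List.nodup_cons] at hnd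
    by_cases he : e.1 = num
    · have heq : e = (num, (st, en, c0)) := by
        rcases List.mem_cons.mp hm with hm | hm
        · exact hm.symm
        · exfalso
          have : (num : Int) ∈ es.map Prod.fst := List.mem_map_of_mem hm
          rw [← he] at this
          exact hnd.1 this
      have hid : es.map (pvUpd num st i c0) = es := by
        apply pvMap_upd_id; intro q hq hk
        have : q.1 ∈ es.map Prod.fst := List.mem_map_of_mem hq
        rw [hk, ← he] at this
        exact hnd.1 this
      simp only [heq, pvUpd, beq_self_eq_true, if_pos, List.map_cons, hid, pvMinAt, pvCnt, h1,
        if_pos rfl, h0, if_neg, pvSpn]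
      rcases hmin : pvMinAt g (es.map Prod.snd) with _ | a <;>
        simp [pvOMin, hmin, min_comm]
    · have hm' : (num, (st, en, c0)) ∈ es := by
        rcases List.mem_cons.mp hm with hm | hm
        · exact absurd (congrArg Prod.fst hm.symm) he
        · exact hm
      have hu : pvUpd num st i c0 e = e := by simp [pvUpd, he]
      by_cases hce : pvCnt e.2 = g
      · simp only [List.map_cons, hu, pvMinAt, hce, if_pos, ih hnd.2 hm']
        rcases hmin : pvMinAt g (es.map Prod.snd) with _ | a <;>
          simp [pvOMin, hmin, min_assoc]
      · simp only [List.map_cons, hu, pvMinAt, hce, if_neg, ih hnd.2 hm']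
        simp [hce]

lemma pvUpd_minAt_new {L : List (Int × (Int × Int × Int))} {num st en c0 i g}
    (hnd : (L.map Prod.fst).Nodup) (hm : (num, (st, en, c0)) ∈ L)
    (hall : ∀ q ∈ L, pvCnt q.2 < g) (h1 : c0 + 1 = g) :
    pvMinAt g ((L.map (pvUpd num st i c0)).map Prod.snd) = some (i - st + 1) := by
  induction L with
  | nil => cases hm
  | cons e es ih =>
    simp only [List.map_cons, List.nodup_cons] at hnd
    by_cases he : e.1 = num
    · have heq : e = (num, (st, en, c0)) := by
        rcases List.mem_cons.mp hm with hm | hm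
        · exact hm.symm
        · exfalso
          have : (num : Int) ∈ es.map Prod.fst := List.mem_map_of_mem hm
          rw [← he] at this
          exact hnd.1 this
      have hid : es.map (pvUpd num st i c0) = es := by
        apply pvMap_upd_id; intro q hq hk
        have : q.1 ∈ es.map Prod.fst := List.mem_map_of_mem hq
        rw [hk, ← he] at this
        exact hnd.1 this
      have hnone : pvMinAt g (es.map Prod.snd) = none := by
        apply pvMinAt_none; intro q hq
        rcases List.mem_map.mp hq with ⟨r, hr, rfl⟩
        exact ne_of_lt (hall r (by simp [hr]))
      simp [heq, pvUpd, hid, pvMinAt, pvCnt, h1, hnone, pvSpn]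
    · have hm' : (num, (st, en, c0)) ∈ es := by
        rcases List.mem_cons.mp hm with hm | hm
        · exact absurd (congrArg Prod.fst hm.symm) he
        · exact hm
      have hu : pvUpd num st i c0 e = e := by simp [pvUpd, he]
      have hce : pvCnt e.2 ≠ g := ne_of_lt (hall e (by simp))
      simp only [List.map_cons, hu, pvMinAt, hce, if_neg]
      exact ih hnd.2 hm' (fun q hq => hall q (by simp [hq]))

lemma pvMaxC_le {V : List (Int × Int × Int)} {b : Int} (h : ∀ q ∈ V, pvCnt q ≤ b)
    (hb : 0 ≤ b) : pvMaxC V ≤ b := by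
  induction V with
  | nil => simpa [pvMaxC] using hb
  | cons e es ih =>
    have := h e (by simp)
    have := ih (fun q hq => h q (by simp [hq]))
    simp only [pvMaxC]
    omega

lemma pvContains_map {ν : Type} (L : List (Int × (Int × Int × Int)))
    (g : Int × (Int × Int × Int) → ν) (k : Int) :
    (PySem.Dict.mk (L.map (fun q => (q.1, g q)))).contains k = (PySem.Dict.mk L).contains k := by
  simp only [PySem.Dict.contains, List.any_map]
  rfl

lemma pvGet?_map {ν : Type} (L : List (Int × (Int × Int × Int)))
    (g : Int × (Int × Int × Int) → ν) (k : Int) :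
    (PySem.Dict.mk (L.map (fun q => (q.1, g q)))).get? k =
      (List.find? (fun q => q.1 == k) L).map g := by
  simp only [PySem.Dict.get?, List.find?_map]
  rcases h : List.find? ((fun p => p.1 == k) ∘ fun q => (q.1, g q)) L with _ | q
  · have h2 : List.find? (fun q => q.1 == k) L = none := h
    simp [h, h2]
  · have h2 : List.find? (fun q => q.1 == k) L = some q := h
    simp [h, h2]

-- characterisation of one A-step on the items list
lemma pvStepA_items_new (L : List (Int × (Int × Int × Int))) (i num : Int)
    (h : (PySem.Dict.mk L).contains num = false) :
    (pvStepA (PySem.Dict.mk L) (i, num)).items = L ++ [(num, (i, i, 1))] := by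
  have h' : (L.any fun p => p.1 == num) = false := h
  have hall : ∀ q ∈ L, (q.1 == num) = false := by
    simpa [List.any_eq_false] using h'
  have hfind : List.find? (fun q => q.1 == num) L = none := by
    apply List.find?_eq_none.mpr
    intro q hq; simp [hall q hq]
  have h2 : ((L ++ [(num, ((i:Int), (0:Int), (0:Int)))]).any fun p => p.1 == num) = true := by
    simp [List.any_append]
  simp only [pvStepA, PySem.Dict.contains, PySem.Dict.modify, PySem.Dict.getD, PySem.Dict.get?,
    PySem.Dict.insert, h', Bool.false_eq_true, if_false, List.find?_append, hfind, h2, if_true]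
  simp [List.find?, List.map_append]
  conv_rhs => rw [← List.map_id L]
  apply List.map_congr_left
  intro q hq
  have h3 : ¬ q.1 = num := by simpa using hall q hq
  simp [h3]

lemma pvStepA_items_old (L : List (Int × (Int × Int × Int))) (i num st en c0 : Int)
    (hf : List.find? (fun q => q.1 == num) L = some (num, (st, en, c0))) :
    (pvStepA (PySem.Dict.mk L) (i, num)).items = L.map (pvUpd num st i c0) := by
  have hp := List.find?_some hf
  have hmem := List.mem_of_find?_eq_some hf
  have hcont : (L.any fun p => p.1 == num) = true := by
    simp only [List.any_eq_true]
    exact ⟨_, hmem, hp⟩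
  simp only [pvStepA, PySem.Dict.contains, PySem.Dict.modify, PySem.Dict.getD, PySem.Dict.get?,
    PySem.Dict.insert, hcont, if_true, hf, Option.map_some, Option.getD_some]
  apply List.map_congr_left
  intro q hq
  simp [pvUpd]

lemma pvOMin_none (x : Option Int) : pvOMin x none = x := by cases x <;> rfl

-- the invariant is preserved by one parallel step
set_option maxHeartbeats 2000000 in
lemma pvStep_inv (d : PySem.Dict Int (Int × Int × Int))
    (s : PySem.Dict Int Int × PySem.Dict Int Int × Int × Int) (p : Int × Int)
    (h : pvInv d.items s.1.items s.2.1.items s.2.2.1 s.2.2.2) :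
    pvInv (pvStepA d p).items (pvStepB s p).1.items (pvStepB s p).2.1.items
      (pvStepB s p).2.2.1 (pvStepB s p).2.2.2 := by
  obtain ⟨L⟩ := d
  obtain ⟨⟨F⟩, ⟨C⟩, deg, ans⟩ := s
  obtain ⟨i, num⟩ := p
  obtain ⟨hnd, h1, hfF, hcC, hdeg, hans⟩ := h
  simp only at hnd h1 hfF hcC hdeg hans
  subst hfF hcC
  have h1' : ∀ q ∈ L.map Prod.snd, 1 ≤ pvCnt q := by
    intro q hq
    rcases List.mem_map.mp hq with ⟨r, hr, rfl⟩
    exact h1 r hr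
  have hdnn : 0 ≤ deg := by rw [hdeg]; exact pvMaxC_nonneg _
  by_cases hcont : (PySem.Dict.mk L).contains num = true
  · -- existing key: entry updated in place
    have hany : (L.any fun p => p.1 == num) = true := hcont
    obtain ⟨q0, hq0mem, hq0p⟩ := List.any_eq_true.mp hany
    have hq0k : q0.1 = num := by simpa using hq0p
    -- the first (and by nodup only) entry with this key
    obtain ⟨r0, hfind⟩ : ∃ r, List.find? (fun q => q.1 == num) L = some r := by
      rcases hr : List.find? (fun q => q.1 == num) L with _ | r
      · exact absurd (by simp [hq0k] : (q0.1 == num) = true)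
          (List.find?_eq_none.mp hr q0 hq0mem)
      · exact ⟨r, hr⟩
    have hr0k : r0.1 = num := by simpa using List.find?_some hfind
    have hr0mem := List.mem_of_find?_eq_some hfind
    obtain ⟨k0, st, en, c0⟩ := r0
    simp only at hr0k
    replace hr0k : num = k0 := hr0k.symm
    subst hr0k
    have hm0 : (num, (st, en, c0)) ∈ L := hr0mem
    have hc01 : 1 ≤ c0 := h1 _ hm0
    have hc0M : c0 ≤ pvMaxC (L.map Prod.snd) := by
      have : ((st, en, c0) : Int × Int × Int) ∈ L.map Prod.snd :=
        List.mem_map_of_mem hm0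
      simpa [pvCnt] using pvCnt_le_maxC this
    have hA := pvStepA_items_old L i num st en c0 hfind
    -- B's step computed
    have hcf1 : (PySem.Dict.mk (L.map (fun q => (q.1, q.2.1)))).contains num = true := by
      rw [pvContains_map]; exact hcont
    have hcf2 : (PySem.Dict.mk (L.map (fun q => (q.1, q.2.2.2)))).contains num = true := by
      rw [pvContains_map]; exact hcont
    have hgetC : (PySem.Dict.mk (L.map (fun q => (q.1, q.2.2.2)))).getD num 0 = c0 := by
      simp [PySem.Dict.getD, pvGet?_map, hfind]
    have hcntB : (PySem.Dict.mk ((L.map (fun q => (q.1, q.2.2.2))).map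
          (fun r => if r.1 == num then (num, c0 + 1) else r))).getD num 0 = c0 + 1 := by
      have hcomp : List.find? (fun r => r.1 == num)
          ((L.map (fun q => (q.1, q.2.2.2))).map (fun r => if r.1 == num then (num, c0 + 1) else r)) =
          some (num, c0 + 1) := by
        rw [List.find?_map, List.find?_map]
        have hpp : (((fun r : Int × Int => r.1 == num) ∘
            (fun r : Int × Int => if r.1 == num then (num, c0 + 1) else r)) ∘
              (fun q : Int × (Int × Int × Int) => (q.1, q.2.2.2))) =
            (fun q : Int × (Int × Int × Int) => q.1 == num) := by
          funext q
          by_cases hk : q.1 = num <;> simp [Function.comp, hk]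
        rw [hpp, hfind]
        simp
      simp only [PySem.Dict.getD, PySem.Dict.get?]
      rw [hcomp]
      rfl
    have hgetF : (PySem.Dict.mk (L.map (fun q => (q.1, q.2.1)))).getD num 0 = st := by
      simp [PySem.Dict.getD, pvGet?_map, hfind]
    have hB : pvStepB (PySem.Dict.mk (L.map (fun q => (q.1, q.2.1))),
          PySem.Dict.mk (L.map (fun q => (q.1, q.2.2.2))), deg, ans) (i, num) =
        (PySem.Dict.mk (L.map (fun q => (q.1, q.2.1))),
         PySem.Dict.mk ((L.map (fun q => (q.1, q.2.2.2))).map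
            (fun r => if r.1 == num then (num, c0 + 1) else r)),
         if deg < c0 + 1 then c0 + 1 else deg,
         if deg < c0 + 1 then i - st + 1
         else if (c0 + 1 == deg) = true then min ans (i - st + 1) else ans) := by
      simp only [pvStepB, hcf1, hcf2, if_true, hgetC, PySem.Dict.insert, hcntB, hgetF]
      simp [hcf2]
      split_ifs <;> rfl
    rw [hA, hB]
    -- count items: insert-mapped list is the count projection of the updated entry list
    have hcountitems : (L.map (fun q => (q.1, q.2.2.2))).map
          (fun r => if r.1 == num then (num, c0 + 1) else r) =
        (L.map (pvUpd num st i c0)).map (fun q => (q.1, q.2.2.2)) := by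
      rw [List.map_map, List.map_map]
      apply List.map_congr_left
      intro q hq
      by_cases hk : q.1 = num <;> simp [Function.comp, pvUpd, hk]
    have hfirstitems : L.map (fun q => (q.1, q.2.1)) =
        (L.map (pvUpd num st i c0)).map (fun q => (q.1, q.2.1)) := by
      rw [List.map_map]
      apply List.map_congr_left
      intro q hq
      by_cases hk : q.1 = num
      · have : q = (num, (st, en, c0)) := pvKeyUnique hnd hq hm0 (by simp [hk])
        subst this
        simp [Function.comp, pvUpd]
      · simp [Function.comp, pvUpd, hk]
    have hkeys : (L.map (pvUpd num st i c0)).map Prod.fst = L.map Prod.fst := by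
      rw [List.map_map]
      apply List.map_congr_left
      intro q hq
      by_cases hk : q.1 = num <;> simp [Function.comp, pvUpd, hk]
    have hMup : pvMaxC ((L.map (pvUpd num st i c0)).map Prod.snd) =
        max (pvMaxC (L.map Prod.snd)) (c0 + 1) := pvUpd_maxC hnd hm0
    have hdegEq : (if deg < c0 + 1 then c0 + 1 else deg) =
        pvMaxC ((L.map (pvUpd num st i c0)).map Prod.snd) := by
      rw [hMup]
      by_cases hlt : deg < c0 + 1
      · simp only [hlt, if_true]
        rw [max_eq_right (by rw [hdeg] at hlt; omega)]
      · simp only [hlt, if_false]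
        rw [hdeg]
        rw [max_eq_left (by rw [hdeg] at hlt; omega)]
    unfold pvInv
    refine ⟨by rw [hkeys]; exact hnd, ?_, hfirstitems, hcountitems, hdegEq, ?_⟩
    · intro q hq
      rcases List.mem_map.mp hq with ⟨r, hr, rfl⟩
      by_cases hk : r.1 = num
      · simp only [pvUpd, hk, beq_self_eq_true, if_true, pvCnt]
        omega
      · have : pvUpd num st i c0 r = r := by simp [pvUpd, hk]
        rw [this]
        exact h1 r hr
    · -- ans component
      rw [← hdegEq]
      by_cases hlt : deg < c0 + 1
      · -- strictly new maximum: the updated entry is the unique max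
        have hall2 : ∀ q ∈ L, pvCnt q.2 < c0 + 1 := by
          intro q hq
          have hle2 : pvCnt q.2 ≤ pvMaxC (L.map Prod.snd) := by
            simpa [pvCnt] using pvCnt_le_maxC (List.mem_map_of_mem (f := Prod.snd) hq)
          rw [hdeg] at hlt
          omega
        simp only [hlt, if_true]
        rw [pvUpd_minAt_new hnd hm0 hall2 rfl]
        rfl
      · simp only [hlt, if_false]
        by_cases heq : c0 + 1 = deg
        · -- joins the existing maxima
          have h0d : c0 ≠ deg := by omega
          rw [pvUpd_minAt_join hnd hm0 h0d heq]
          rw [← hdeg] at hans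
          have hVne : (List.map Prod.snd L) ≠ [] :=
            List.ne_nil_of_mem (List.mem_map_of_mem (f := Prod.snd) hm0)
          obtain ⟨w, hw, hwc⟩ := pvMaxC_attained _ h1' hVne
          rw [← hdeg] at hwc
          obtain ⟨a, ha⟩ := pvMinAt_isSome hw hwc
          rw [ha] at hans ⊢
          simp only [Option.getD_some] at hans
          simp only [pvOMin, Option.getD_some]
          simp [heq, hans]
        · -- no change to the maxima set
          have h0d : c0 ≠ deg := by omega
          rw [pvUpd_minAt_ne hnd hm0 h0d heq]
          rw [← hdeg] at hans
          rw [← hans]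
          simp [heq]
  · -- fresh key: entry appended at the end
    have hcf : (PySem.Dict.mk L).contains num = false := eq_false_of_ne_true hcont
    have hany : (L.any fun p => p.1 == num) = false := hcf
    have hall : ∀ q ∈ L, (q.1 == num) = false := by
      simpa [List.any_eq_false] using hany
    have hnotin : num ∉ L.map Prod.fst := by
      intro hmem
      rcases List.mem_map.mp hmem with ⟨q, hq, hk⟩
      have := hall q hq
      simp [hk] at this
    have hfindL : List.find? (fun q => q.1 == num) L = none := by
      apply List.find?_eq_none.mpr
      intro q hq
      simp [hall q hq]
    have hA := pvStepA_items_new L i num hcf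
    have hcf1 : (PySem.Dict.mk (L.map (fun q => (q.1, q.2.1)))).contains num = false := by
      rw [pvContains_map]; exact hcf
    have hcf2 : (PySem.Dict.mk (L.map (fun q => (q.1, q.2.2.2)))).contains num = false := by
      rw [pvContains_map]; exact hcf
    have hget0 : (PySem.Dict.mk (L.map (fun q => (q.1, q.2.2.2)))).getD num 0 = 0 := by
      simp [PySem.Dict.getD, pvGet?_map, hfindL]
    have hfindC : List.find? (fun r : Int × Int => r.1 == num) (L.map (fun q => (q.1, q.2.2.2))) =
        none := by
      rw [List.find?_map]
      rw [show ((fun r : Int × Int => r.1 == num) ∘ (fun q : Int × (Int × Int × Int) => (q.1, q.2.2.2))) =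
        (fun q : Int × (Int × Int × Int) => q.1 == num) from rfl, hfindL]
      rfl
    have hfindF : List.find? (fun r : Int × Int => r.1 == num) (L.map (fun q => (q.1, q.2.1))) =
        none := by
      rw [List.find?_map]
      rw [show ((fun r : Int × Int => r.1 == num) ∘ (fun q : Int × (Int × Int × Int) => (q.1, q.2.1))) =
        (fun q : Int × (Int × Int × Int) => q.1 == num) from rfl, hfindL]
      rfl
    have hgetC1 : (PySem.Dict.mk (L.map (fun q => (q.1, q.2.2.2)) ++ [(num, 0 + 1)])).getD num 0 = 1 := by
      simp [PySem.Dict.getD, PySem.Dict.get?, List.find?_append, hfindC]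
    have hgetF1 : (PySem.Dict.mk (L.map (fun q => (q.1, q.2.1)) ++ [(num, i)])).getD num 0 = i := by
      simp [PySem.Dict.getD, PySem.Dict.get?, List.find?_append, hfindF]
    have hB : pvStepB (PySem.Dict.mk (L.map (fun q => (q.1, q.2.1))),
          PySem.Dict.mk (L.map (fun q => (q.1, q.2.2.2))), deg, ans) (i, num) =
        (PySem.Dict.mk (L.map (fun q => (q.1, q.2.1)) ++ [(num, i)]),
         PySem.Dict.mk (L.map (fun q => (q.1, q.2.2.2)) ++ [(num, 0 + 1)]),
         if deg < 1 then 1 else deg,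
         if deg < 1 then i - i + 1
         else if ((1 : Int) == deg) = true then min ans (i - i + 1) else ans) := by
      simp only [pvStepB, hcf1, hcf2, Bool.false_eq_true, if_false, hget0, PySem.Dict.insert,
        hgetC1, hgetF1]
      simp [hcf1, hcf2]
      split_ifs <;> simp_all <;> omega
    rw [hA, hB]
    have hMa : pvMaxC ((L ++ [(num, (i, i, 1))]).map Prod.snd) =
        max (pvMaxC (L.map Prod.snd)) 1 := by
      rw [List.map_append, pvMaxC_append]
      norm_num [pvMaxC, pvCnt]
    have hsingle : ∀ g : Int, pvMinAt g [((i, i, 1) : Int × Int × Int)] =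
        if (1 : Int) = g then some 1 else none := by
      intro g
      by_cases hg : (1 : Int) = g <;> simp [pvMinAt, pvCnt, pvSpn, hg]
    have hdegEq : (if deg < 1 then 1 else deg) =
        pvMaxC ((L ++ [(num, (i, i, 1))]).map Prod.snd) := by
      rw [hMa]
      by_cases hlt : deg < 1
      · have hL : L = [] := by
          rcases L with _ | ⟨q, L'⟩
          · rfl
          · exfalso
            have hc1 := h1 q (by simp)
            have hle2 : pvCnt q.2 ≤ pvMaxC ((q :: L').map Prod.snd) := by
              simpa [pvCnt] using pvCnt_le_maxC (List.mem_map_of_mem (f := Prod.snd)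
                (show q ∈ q :: L' by simp))
            rw [← hdeg] at hle2
            omega
        subst hL
        simp only [hlt, if_true, List.map_nil, pvMaxC]
        norm_num
      · simp only [hlt, if_false]
        rw [hdeg]
        rw [max_eq_left (by rw [hdeg] at hlt; omega)]
    unfold pvInv
    refine ⟨?_, ?_, by simp [List.map_append], by norm_num [List.map_append], hdegEq, ?_⟩
    · simp only [List.map_append, List.map_cons, List.map_nil]
      rw [List.nodup_append]
      refine ⟨hnd, List.nodup_singleton _, ?_⟩
      intro a ha b hb
      rw [List.mem_singleton] at hb
      subst hb
      exact fun hh => hnotin (hh ▸ ha)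
    · intro q hq
      rcases List.mem_append.mp hq with hq | hq
      · exact h1 q hq
      · simp at hq
        subst hq
        norm_num [pvCnt]
    · -- ans component
      show (if deg < 1 then i - i + 1
        else if ((1 : Int) == deg) = true then min ans (i - i + 1) else ans) = _
      rw [← hdegEq, List.map_append, pvMinAt_append]
      simp only [List.map_cons, List.map_nil]
      rw [hsingle]
      by_cases hlt : deg < 1
      · have hL : L = [] := by
          rcases L with _ | ⟨q, L'⟩
          · rfl
          · exfalso
            have hc1 := h1 q (by simp)
            have hle2 : pvCnt q.2 ≤ pvMaxC ((q :: L').map Prod.snd) := by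
              simpa [pvCnt] using pvCnt_le_maxC (List.mem_map_of_mem (f := Prod.snd)
                (show q ∈ q :: L' by simp))
            rw [← hdeg] at hle2
            omega
        subst hL
        simp [hlt, pvMinAt, pvOMin]
      · simp only [hlt, if_false]
        by_cases heq : ((1 : Int) == deg) = true
        · have heq' : (1 : Int) = deg := by simpa using heq
          have hLne : L ≠ [] := by
            intro hnil
            subst hnil
            simp [pvMaxC] at hdeg
            omega
          have hVne : (List.map Prod.snd L) ≠ [] := by simpa using hLne
          obtain ⟨w, hw, hwc⟩ := pvMaxC_attained _ h1' hVne
          rw [← hdeg] at hwc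
          obtain ⟨a, ha⟩ := pvMinAt_isSome hw hwc
          rw [← hdeg] at hans
          rw [ha] at hans ⊢
          simp only [Option.getD_some] at hans
          simp [heq, ← heq', pvOMin, hans]
        · have hne1 : ¬ ((1 : Int) = deg) := by simpa using heq
          rw [← hdeg] at hans
          rw [if_neg hne1, pvOMin_none, ← hans]
          simp [heq]


lemma pvFold_inv (ps : List (Int × Int)) :
    ∀ (d : PySem.Dict Int (Int × Int × Int))
      (s : PySem.Dict Int Int × PySem.Dict Int Int × Int × Int),
      pvInv d.items s.1.items s.2.1.items s.2.2.1 s.2.2.2 →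
      pvInv (ps.foldl pvStepA d).items (ps.foldl pvStepB s).1.items
        (ps.foldl pvStepB s).2.1.items (ps.foldl pvStepB s).2.2.1 (ps.foldl pvStepB s).2.2.2 := by
  induction ps with
  | nil => intro d s h; exact h
  | cons p ps ih => intro d s h; exact ih _ _ (pvStep_inv d s p h)

lemma pvInsert_ne_nil (d : PySem.Dict Int (Int × Int × Int)) (k : Int) (v : Int × Int × Int) :
    (d.insert k v).items ≠ [] := by
  unfold PySem.Dict.insert
  split_ifs with h
  · simp only [PySem.Dict.contains, List.any_eq_true] at h
    rcases h with ⟨q, hq, _⟩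
    simp only [ne_eq, List.map_eq_nil_iff]
    exact List.ne_nil_of_mem hq
  · simp

lemma pvStepA_ne_nil (d : PySem.Dict Int (Int × Int × Int)) (p : Int × Int) :
    (pvStepA d p).items ≠ [] := by
  simp only [pvStepA, PySem.Dict.modify]
  exact pvInsert_ne_nil _ _ _

lemma pvFoldA_ne_nil (ps : List (Int × Int)) (d : PySem.Dict Int (Int × Int × Int))
    (h : ps ≠ []) : (ps.foldl pvStepA d).items ≠ [] := by
  induction ps generalizing d with
  | nil => exact absurd rfl h
  | cons p ps ih =>
    cases ps with
    | nil => exact pvStepA_ne_nil d p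
    | cons q qs => exact ih _ (by simp)

lemma pvMax?_total {α : Type} (xs : List α) (key : α → Int) (h : xs ≠ []) :
    ∃ m, PySem.List.max? xs key = some m := by
  cases xs with
  | nil => exact absurd rfl h
  | cons x t =>
    unfold PySem.List.max?
    simp only [List.foldl_cons]
    induction t generalizing x with
    | nil => exact ⟨x, rfl⟩
    | cons y t ih =>
      simp only [List.foldl_cons]
      by_cases hk : key x < key y
      · simpa [hk] using ih y
      · simpa [hk] using ih x

lemma pvMin?_total {α : Type} (xs : List α) (key : α → Int) (h : xs ≠ []) :
    ∃ m, PySem.List.min? xs key = some m := by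
  cases xs with
  | nil => exact absurd rfl h
  | cons x t =>
    unfold PySem.List.min?
    simp only [List.foldl_cons]
    induction t generalizing x with
    | nil => exact ⟨x, rfl⟩
    | cons y t ih =>
      simp only [List.foldl_cons]
      by_cases hk : key y < key x
      · simpa [hk] using ih y
      · simpa [hk] using ih x

-- A's three post-passes compute exactly (pvMinAt (pvMaxC V) V).getD 0
lemma pvA_final (L : List (Int × (Int × Int × Int))) (hne : L ≠ [])
    (h1 : ∀ q ∈ L, 1 ≤ pvCnt q.2) :
    (match PySem.List.max? (PySem.Dict.mk L).values (fun x => x.2.2) with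
     | none => (0 : Int)
     | some m =>
       match PySem.List.min? ((PySem.Dict.mk L).values.filter (fun x => x.2.2 == m.2.2))
           (fun x => x.2.1 - x.1) with
       | none => 0
       | some s => s.2.1 - s.1 + 1) =
    (pvMinAt (pvMaxC (L.map Prod.snd)) (L.map Prod.snd)).getD 0 := by
  have hVne : L.map Prod.snd ≠ [] := by simpa using hne
  have hV1 : ∀ q ∈ L.map Prod.snd, 1 ≤ pvCnt q := by
    intro q hq
    rcases List.mem_map.mp hq with ⟨r, hr, rfl⟩
    exact h1 r hr
  have hvals : (PySem.Dict.mk L).values = L.map Prod.snd := rfl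
  obtain ⟨m, hm⟩ := pvMax?_total (L.map Prod.snd) (fun x => x.2.2) hVne
  have hmem := PySem.List.max?_mem hm
  have hmax := PySem.List.max?_isMax hm
  have hm1 : 1 ≤ pvCnt m := hV1 m hmem
  have hmc : pvCnt m = pvMaxC (L.map Prod.snd) :=
    le_antisymm (pvCnt_le_maxC hmem) (pvMaxC_le (fun q hq => hmax q hq) (by omega))
  have hmdeg : m ∈ (L.map Prod.snd).filter (fun x => x.2.2 == m.2.2) :=
    List.mem_filter.mpr ⟨hmem, by simp⟩
  obtain ⟨sv, hs⟩ := pvMin?_total ((L.map Prod.snd).filter (fun x => x.2.2 == m.2.2))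
    (fun x => x.2.1 - x.1) (List.ne_nil_of_mem hmdeg)
  have hsmem' := PySem.List.min?_mem hs
  have hsmin := PySem.List.min?_isMin hs
  have hsV : sv ∈ L.map Prod.snd := (List.mem_filter.mp hsmem').1
  have hsc : pvCnt sv = pvCnt m := by
    have := (List.mem_filter.mp hsmem').2
    simpa [pvCnt] using this
  obtain ⟨a, ha⟩ := pvMinAt_isSome (g := pvMaxC (L.map Prod.snd)) hsV (by rw [hsc, hmc])
  have hle : a ≤ pvSpn sv := pvMinAt_le hsV (by rw [hsc, hmc]) ha
  obtain ⟨q, hq, hqg, hqs⟩ := pvMinAt_attained ha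
  have hqfil : q ∈ (L.map Prod.snd).filter (fun x => x.2.2 == m.2.2) := by
    refine List.mem_filter.mpr ⟨hq, ?_⟩
    have : pvCnt q = pvCnt m := by rw [hqg, hmc]
    simpa [pvCnt] using this
  have hge : sv.2.1 - sv.1 ≤ q.2.1 - q.1 := hsmin q hqfil
  rw [hvals]
  simp only [hm, hs, ha, Option.getD_some]
  show pvSpn sv = a
  simp only [pvSpn] at hle hqs ⊢
  omega

lemma pvEnumerate_ne_nil (nums : List Int) (h : nums ≠ []) :
    PySem.List.enumerate nums ≠ [] := by
  cases nums with
  | nil => exact absurd rfl h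
  | cons x xs => simp [PySem.List.enumerate]

-- ===== VERDICT (by name: the statement is the Claim_ definition above) =====
theorem findShortestSubArray_spec : Claim_equal_findShortestSubArray := by
  intro nums _ hpre
  unfold Spec_findShortestSubArray findShortestSubArray findShortestSubArray_alt
  have hinv0 : pvInv (PySem.Dict.mk ([] : List (Int × (Int × Int × Int)))).items
      (PySem.Dict.mk ([] : List (Int × Int))).items (PySem.Dict.mk ([] : List (Int × Int))).items 0 0 := by
    refine ⟨by simp, by simp, by simp, by simp, by simp [pvMaxC], by simp [pvMinAt]⟩
  have hinv := pvFold_inv (PySem.List.enumerate nums) _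
    (PySem.Dict.mk [], PySem.Dict.mk [], 0, 0) hinv0
  have hne := pvFoldA_ne_nil (PySem.List.enumerate nums) (PySem.Dict.mk [])
    (pvEnumerate_ne_nil nums hpre)
  obtain ⟨hnd, hcnt, hf, hc, hdeg, hans⟩ := hinv
  rw [pvA_final _ hne hcnt, ← hans]
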